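-- pv_equiv track=rewrite | github.com/matthewvcarey1/listPrimeFactorsInPython | main.py | list_base_exponents
-- ===== SOURCE A (Python) =====
-- def list_base_exponents(nums):
--     nums.sort()
--     lbe = []
--     last_num = -1
--     lbe_index = -1
--     first = True
--     for n in nums:
--         if first is False and n == last_num:
--             base, exponent = lbe[lbe_index]
--             exponent += 1
--             lbe[lbe_index] = (base, exponent)
--         else:
--             lbe_index += 1
--             be = (n, 1)
--             lbe.append(be)
--             last_num = n
--         first = False
--     return lbe
-- ===== SOURCE B (Python) =====
-- def list_base_exponents(nums):
--     nums.sort()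
--     lbe = []
--     i, n = 0, len(nums)
--     while i < n:
--         v = nums[i]
--         # binary search for the end of the run of v (first index > i with a different value)
--         lo, hi = i + 1, n
--         while lo < hi:
--             mid = (lo + hi) // 2
--             if nums[mid] == v:
--                 lo = mid + 1
--             else:
--                 hi = mid
--         lbe.append((v, lo - i))
--         i = lo
--     return lbe
-- ===== Notes on version B (the rewrite author's own statement) =====
-- stated objective: alternative
-- what changed: Replaced A's single linear pass with per-element run-length bookkeeping (first/last_num/lbe_index and read-modify-write list indexing) by a loop over runs that locates the end of each run of equal values in the sorted list with a hand-written binary search, trading the element-by-element count for logarithmic probing per distinct value.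
import Mathlib
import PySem

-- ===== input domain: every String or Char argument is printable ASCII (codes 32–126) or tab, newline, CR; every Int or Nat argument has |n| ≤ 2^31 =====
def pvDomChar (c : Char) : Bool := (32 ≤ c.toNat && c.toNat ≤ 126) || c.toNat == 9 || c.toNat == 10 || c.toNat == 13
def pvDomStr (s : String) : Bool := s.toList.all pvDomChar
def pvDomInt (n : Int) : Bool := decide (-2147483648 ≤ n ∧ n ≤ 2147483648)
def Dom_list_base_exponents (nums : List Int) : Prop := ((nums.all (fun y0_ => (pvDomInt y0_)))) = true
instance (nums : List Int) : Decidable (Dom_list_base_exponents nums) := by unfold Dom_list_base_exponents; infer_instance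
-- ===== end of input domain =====

-- B locates the end of each run of equal values in the sorted list by binary search instead of
-- A's per-element run-length bookkeeping (alternative algorithm, same overall cost).
-- Both Pythons call nums.sort(), so both mutate the argument identically; theorems are about the return value.

-- ===== PORT A =====
-- loop state: (lbe, last_num, lbe_index, first); lbe[lbe_index] is read/written via
-- pyGetD/pySetD — exact here: lbe_index is always lbe.length - 1, i.e. in range.
def list_base_exponents (nums : List Int) : List (Int × Int) :=
  let numsSorted := PySem.List.sorted nums (fun x => x)
  let st := numsSorted.foldl
    (fun (st : List (Int × Int) × Int × Int × Bool) n =>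
      let lbe := st.1; let last_num := st.2.1; let lbe_index := st.2.2.1; let first := st.2.2.2
      if first = false ∧ n = last_num then
        let be := PySem.List.pyGetD lbe lbe_index (0, 0)
        (PySem.List.pySetD lbe lbe_index (be.1, be.2 + 1), last_num, lbe_index, false)
      else
        (lbe ++ [(n, 1)], n, lbe_index + 1, false))
    ([], -1, -1, true)
  st.1

-- ===== PORT B =====
-- Source B's inner `while lo < hi` binary search.  Indices are kept as Nat (in Source B they are
-- always nonnegative and nums[mid] is in range, i <= mid < n, so getD is exact); the fuel
-- parameter is only a structural bound on the number of loop iterations (hi - lo suffices,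
-- since the interval shrinks each step) and does not change the computation.
def lbeInner (nums : List Int) (v : Int) (fuel lo hi : Nat) : Nat :=
  match fuel with
  | 0 => lo
  | fuel + 1 =>
    if lo < hi then
      if nums.getD ((lo + hi) / 2) 0 = v then lbeInner nums v fuel ((lo + hi) / 2 + 1) hi
      else lbeInner nums v fuel lo ((lo + hi) / 2)
    else lo

-- Source B's outer `while i < n` loop; fuel = remaining-iteration bound (i advances each step).
def lbeOuter (nums : List Int) (fuel i : Nat) : List (Int × Int) :=
  match fuel with
  | 0 => []
  | fuel + 1 =>
    if i < nums.length then
      let v := nums.getD i 0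
      let j := lbeInner nums v (nums.length - (i + 1)) (i + 1) nums.length
      (v, ((j - i : Nat) : Int)) :: lbeOuter nums fuel j
    else []

def list_base_exponents_alt (nums : List Int) : List (Int × Int) :=
  let numsSorted := PySem.List.sorted nums (fun x => x)
  lbeOuter numsSorted numsSorted.length 0

-- ===== PRECONDITION & SPEC =====
def Spec_list_base_exponents (nums : List Int) (out : List (Int × Int)) : Prop := out = list_base_exponents_alt nums
instance (nums : List Int) (out : List (Int × Int)) : Decidable (Spec_list_base_exponents nums out) := by unfold Spec_list_base_exponents; infer_instance

-- ===== CLAIM (what is proved, stated in full; the proofs are below) =====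
def Claim_equal_list_base_exponents : Prop := ∀ (nums : List Int), Dom_list_base_exponents nums → Spec_list_base_exponents nums (list_base_exponents nums)

-- ===== LEMMAS AND PROOFS =====

-- A's loop body, named for the lemmas (definitionally the lambda inside the port).
def aStep (st : List (Int × Int) × Int × Int × Bool) (n : Int) : List (Int × Int) × Int × Int × Bool :=
  let lbe := st.1; let last_num := st.2.1; let lbe_index := st.2.2.1; let first := st.2.2.2
  if first = false ∧ n = last_num then
    let be := PySem.List.pyGetD lbe lbe_index (0, 0)
    (PySem.List.pySetD lbe lbe_index (be.1, be.2 + 1), last_num, lbe_index, false)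
  else
    (lbe ++ [(n, 1)], n, lbe_index + 1, false)

-- run-length encoding of adjacent equal elements (the common characterisation)
def rleAux (x : Int) (c : Int) : List Int → List (Int × Int)
  | [] => [(x, c)]
  | y :: ys => if y = x then rleAux x (c + 1) ys else (x, c) :: rleAux y 1 ys

def rle : List Int → List (Int × Int)
  | [] => []
  | x :: xs => rleAux x 1 xs

theorem list_base_exponents_eq_foldl (nums : List Int) :
    list_base_exponents nums =
      ((PySem.List.sorted nums (fun x => x)).foldl aStep ([], -1, -1, true)).1 := rfl

theorem getD_append_len (front : List (Int × Int)) (a d : Int × Int) :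
    PySem.List.pyGetD (front ++ [a]) (front.length : Int) d = a := by
  simp [PySem.List.pyGetD_natCast, List.getD_eq_getElem?_getD]

theorem set_append_len (front : List (Int × Int)) (a b : Int × Int) :
    (front ++ [a]).set front.length b = front ++ [b] := by
  induction front with
  | nil => rfl
  | cons p ps ih => simp [ih]

theorem foldl_aStep (xs : List Int) : ∀ (front : List (Int × Int)) (x c : Int),
    (xs.foldl aStep (front ++ [(x, c)], x, (front.length : Int), false)).1
      = front ++ rleAux x c xs := by
  induction xs with
  | nil => intro front x c; simp [rleAux]
  | cons n rest ih =>
    intro front x c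
    by_cases h : n = x
    · subst h
      have hstep : aStep (front ++ [(n, c)], n, (front.length : Int), false) n
          = (front ++ [(n, c + 1)], n, (front.length : Int), false) := by
        simp only [aStep, getD_append_len, PySem.List.pySetD_natCast, set_append_len]
        simp
      simp only [List.foldl_cons, hstep]
      simpa [rleAux] using ih front n (c + 1)
    · have hstep : aStep (front ++ [(x, c)], x, (front.length : Int), false) n
          = ((front ++ [(x, c)]) ++ [(n, 1)], n, (front.length : Int) + 1, false) := by
        simp [aStep, h]
      simp only [List.foldl_cons, hstep]
      have : ((front ++ [(x, c)]).length : Int) = (front.length : Int) + 1 := by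
        simp
      rw [← this]
      simpa [rleAux, h] using ih (front ++ [(x, c)]) n 1

theorem a_eq_rle (nums : List Int) :
    list_base_exponents nums = rle (PySem.List.sorted nums (fun x => x)) := by
  rw [list_base_exponents_eq_foldl]
  cases hs : PySem.List.sorted nums (fun x => x) with
  | nil => rfl
  | cons x xs =>
    have hstep : aStep ([], -1, -1, true) x = ([(x, 1)], x, 0, false) := by
      simp [aStep]
    simp only [List.foldl_cons, hstep, rle]
    simpa using foldl_aStep xs [] x 1

-- ===== B-side lemmas =====

-- binary-search correctness: with a downward-closed predicate `getD k = v` on [lo, hi),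
-- lbeInner (with enough fuel) returns the boundary j: everything in [lo, j) equals v,
-- nothing in [j, hi) does.
theorem lbeInner_spec (s : List Int) (v : Int) :
    ∀ fuel lo hi, lo ≤ hi → hi - lo ≤ fuel →
    (∀ a b, lo ≤ a → a ≤ b → b < hi → s.getD b 0 = v → s.getD a 0 = v) →
    lo ≤ lbeInner s v fuel lo hi ∧ lbeInner s v fuel lo hi ≤ hi ∧
    (∀ k, lo ≤ k → k < lbeInner s v fuel lo hi → s.getD k 0 = v) ∧
    (∀ k, lbeInner s v fuel lo hi ≤ k → k < hi → s.getD k 0 ≠ v) := by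
  intro fuel
  induction fuel with
  | zero =>
    intro lo hi hle hf _
    have : lo = hi := by omega
    subst this
    exact ⟨Nat.le_refl lo, Nat.le_refl lo, fun k h1 h2 => absurd h1 (by simp [lbeInner] at h2 ⊢; omega),
      fun k h1 h2 => absurd h2 (by simp [lbeInner] at h1 ⊢; omega)⟩
  | succ fuel ihf =>
    intro lo hi hle hf hdc
    rw [lbeInner]
    split
    · next hlt =>
      have hmid : lo ≤ (lo + hi) / 2 ∧ (lo + hi) / 2 < hi := by omega
      split
      · next hq =>
        have ih := ihf ((lo + hi) / 2 + 1) hi (by omega) (by omega)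
          (fun a b ha hab hb hqb => hdc a b (by omega) hab hb hqb)
        refine ⟨by omega, ih.2.1, ?_, ih.2.2.2⟩
        intro k hk1 hk2
        by_cases hk : k ≤ (lo + hi) / 2
        · exact hdc k _ hk1 hk hmid.2 hq
        · exact ih.2.2.1 k (by omega) hk2
      · next hq =>
        have ih := ihf lo ((lo + hi) / 2) (by omega) (by omega)
          (fun a b ha hab hb hqb => hdc a b ha hab (by omega) hqb)
        refine ⟨ih.1, by omega, ih.2.2.1, ?_⟩
        intro k hk1 hk2
        by_cases hk : k < (lo + hi) / 2
        · exact ih.2.2.2 k hk1 hk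
        · intro hqk
          exact hq (hdc _ k (by omega) (by omega) hk2 hqk)
    · exact ⟨Nat.le_refl lo, hle, fun k h1 h2 => absurd h1 (by omega),
        fun k h1 h2 => absurd h2 (by omega)⟩

-- a constant block peels off the drop
theorem drop_eq_replicate_append (s : List Int) :
    ∀ i j, i ≤ j → j ≤ s.length → (∀ k, i ≤ k → k < j → s.getD k 0 = (s.getD i 0)) →
    ∀ v, v = s.getD i 0 →
    s.drop i = List.replicate (j - i) v ++ s.drop j := by
  intro i j hij hj hall v hv
  induction hd : j - i generalizing i v with
  | zero =>
    have : i = j := by omega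
    subst this; simp
  | succ m ih =>
    have hi : i < s.length := by omega
    have hdrop : s.drop i = s[i] :: s.drop (i + 1) := by
      rw [List.drop_eq_getElem_cons hi]
    rw [hdrop]
    have hv' : v = s[i] := by
      rw [hv, List.getD_eq_getElem?_getD]; simp [List.getElem?_eq_getElem hi]
    by_cases him : i + 1 < j
    · have hnext : s.getD (i + 1) 0 = s.getD i 0 := hall (i + 1) (by omega) him
      have := ih (i + 1) (by omega)
        (fun k hk1 hk2 => by rw [hall k (by omega) hk2, hnext]) v (by rw [hv, hnext]) (by omega)
      rw [this, List.replicate_succ, hv']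
      simp
    · have hj1 : j = i + 1 := by omega
      subst hj1
      have hm : m = 0 := by omega
      subst hm
      simp [hv']
  
-- rle over a constant block
theorem rleAux_replicate (u : List Int) (v : Int) :
    ∀ (m : Nat) (c : Int), rleAux v c (List.replicate m v ++ u) = rleAux v (c + m) u := by
  intro m
  induction m with
  | zero => intro c; simp
  | succ k ih =>
    intro c
    rw [List.replicate_succ, List.cons_append, rleAux, if_pos rfl, ih]
    congr 1
    push_cast; ring

theorem rleAux_stop (u : List Int) (v c : Int) (hu : ∀ y ∈ u.head?, y ≠ v) :
    rleAux v c u = (v, c) :: rle u := by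
  cases u with
  | nil => rfl
  | cons y ys =>
    have : y ≠ v := hu y (by simp)
    rw [rleAux, if_neg this, rle]

-- B computes rle of the sorted list
theorem lbeOuter_eq_rle_aux (s : List Int) (hp : s.Pairwise (· ≤ ·)) :
    ∀ fuel i, s.length - i ≤ fuel → lbeOuter s fuel i = rle (s.drop i) := by
  intro fuel
  induction fuel with
  | zero =>
    intro i hd
    rw [lbeOuter, List.drop_eq_nil_of_le (by omega)]
    rfl
  | succ m ih =>
    intro i hd
    by_cases hi : i < s.length
    · have hget : ∀ k (hk : k < s.length), s.getD k 0 = s[k] := by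
        intro k hk; rw [List.getD_eq_getElem?_getD]; simp [List.getElem?_eq_getElem hk]
      have hmono : ∀ a b (ha : a < s.length) (hb : b < s.length), a ≤ b → s[a] ≤ s[b] := by
        intro a b ha hb hab
        rcases Nat.lt_or_ge a b with h | h
        · exact List.pairwise_iff_getElem.1 hp a b ha hb h
        · have : a = b := by omega
          subst this; exact le_refl _
      set v := s.getD i 0 with hvdef
      have hdc : ∀ a b, i + 1 ≤ a → a ≤ b → b < s.length → s.getD b 0 = v → s.getD a 0 = v := by
        intro a b ha hab hb hqb
        have ha' : a < s.length := by omega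
        rw [hget a ha']
        rw [hget b hb] at hqb
        have h1 : s[i] ≤ s[a] := hmono i a hi ha' (by omega)
        have h2 : s[a] ≤ s[b] := hmono a b ha' hb hab
        have hvi : v = s[i] := by rw [hvdef, hget i hi]
        omega
      obtain ⟨hge, hle2, hall, hnone⟩ :=
        lbeInner_spec s v (s.length - (i + 1)) (i + 1) s.length (by omega) (by omega) hdc
      set j := lbeInner s v (s.length - (i + 1)) (i + 1) s.length with hjdef
      have hrun : ∀ k, i ≤ k → k < j → s.getD k 0 = v := by
        intro k hk1 hk2
        rcases Nat.eq_or_lt_of_le hk1 with h | h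
        · rw [← h]
        · exact hall k h hk2
      have hdropeq : s.drop i = List.replicate (j - i) v ++ s.drop j :=
        drop_eq_replicate_append s i j (by omega) hle2 hrun v rfl
      have hsplit : s.drop i = v :: (List.replicate (j - i - 1) v ++ s.drop j) := by
        rw [hdropeq]
        have h1 : j - i = (j - i - 1) + 1 := by omega
        rw [h1, List.replicate_succ]
        simp
      have hstop : ∀ y ∈ (s.drop j).head?, y ≠ v := by
        intro y hy
        rw [List.head?_drop] at hy
        have hjlen : j < s.length := by
          by_contra hc
          rw [List.getElem?_eq_none (by omega)] at hy
          exact absurd hy (by simp)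
        rw [List.getElem?_eq_getElem hjlen] at hy
        have hyv : y = s[j] := by simpa using hy.symm
        have := hnone j (le_refl j) hjlen
        rw [hget j hjlen] at this
        rw [hyv]; exact this
      have hrec : lbeOuter s m j = rle (s.drop j) := ih j (by omega)
      have hout : lbeOuter s (m + 1) i = (v, ((j - i : Nat) : Int)) :: lbeOuter s m j := by
        rw [lbeOuter, if_pos hi]
      rw [hout, hrec, hsplit, rle, rleAux_replicate, rleAux_stop _ _ _ hstop]
      have : (1 : Int) + ((j - i - 1 : Nat) : Int) = ((j - i : Nat) : Int) := by
        push_cast [Nat.cast_sub (by omega : i ≤ j)]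
        omega
      rw [this]
    · rw [lbeOuter, if_neg hi, List.drop_eq_nil_of_le (by omega)]
      rfl

theorem b_eq_rle (nums : List Int) :
    list_base_exponents_alt nums = rle (PySem.List.sorted nums (fun x => x)) := by
  have := lbeOuter_eq_rle_aux (PySem.List.sorted nums (fun x => x))
    (PySem.List.sorted_pairwise nums (fun x => x))
    (PySem.List.sorted nums (fun x => x)).length 0 (by omega)
  simpa [list_base_exponents_alt] using this

-- ===== VERDICT (by name: the statement is the Claim_ definition above) =====
theorem list_base_exponents_spec : Claim_equal_list_base_exponents := by
  intro nums _
  unfold Spec_list_base_exponents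
  rw [a_eq_rle, b_eq_rle]
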